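-- pv_equiv track=rewrite | github.com/Stinoo01/ADM-HW1 | Problem1.py | sor
-- ===== SOURCE A (Python) =====
-- def sor(k):
--     letters = []
--     digits = []
--     for x in k:
--         if x.isalpha():
--             letters.append(x)
--         else:
--             digits.append(int(x))
--
--     upper = []
--     lower = []
--     for w in letters:
--         if w.isupper():
--             upper.append(w)
--         else:
--             lower.append(w)
--
--     even = []
--     odd = []
--
--     for z in digits:
--         if z % 2 == 0:
--             even.append(z)
--         else:
--             odd.append(z)
--
--     upper = sorted(upper)
--     lower = sorted(lower)
--     even = sorted(even)
--     odd = sorted(odd)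
--
--     result_letters = lower + upper
--     result_numbers = odd + even
--
--     return ''.join(result_letters) +''.join(map(str,result_numbers))
-- ===== SOURCE B (Python) =====
-- def sor(k):
--     # single keyed sort instead of four buckets: lower letters, upper letters,
--     # odd digits, even digits, each ascending; int(c) raises ValueError on
--     # non-letter non-digit chars exactly as the original does
--     def rank(c):
--         if c.isalpha():
--             b = 0 if c.islower() else 1
--         else:
--             b = 2 if int(c) % 2 else 3
--         return b * 0x110000 + ord(c)
--     return ''.join(sorted(k, key=rank))
-- ===== Notes on version B (the rewrite author's own statement) =====
-- stated objective: simpler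
-- what changed: Replaces the six bucket lists, four separate sorts and two joins with a single keyed sort over the whole string (class-then-character key) followed by one join.
import Mathlib
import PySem

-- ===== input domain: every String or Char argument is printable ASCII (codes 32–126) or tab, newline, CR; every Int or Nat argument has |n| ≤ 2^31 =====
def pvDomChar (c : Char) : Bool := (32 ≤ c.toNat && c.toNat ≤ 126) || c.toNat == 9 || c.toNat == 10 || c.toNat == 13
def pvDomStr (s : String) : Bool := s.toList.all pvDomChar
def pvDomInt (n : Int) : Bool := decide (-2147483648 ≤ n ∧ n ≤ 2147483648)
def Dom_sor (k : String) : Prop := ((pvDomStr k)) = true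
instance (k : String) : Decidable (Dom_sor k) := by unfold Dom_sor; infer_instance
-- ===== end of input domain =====

-- B replaces A's six bucket lists / four sorts / two joins by ONE keyed sort + one join (objective: simpler).

-- ===== PORT A =====
-- int(x) for one char; Pre_sor excludes the inputs where Python raises ValueError (ofStr? = none)
def pvToInt (c : Char) : Int := (PySem.Int.ofStr? (String.mk [c])).getD 0

def sor (k : String) : String :=
  let p := k.toList.foldl (fun (p : List Char × List Int) x =>
      if PySem.Chars.isalpha x then (p.1 ++ [x], p.2) else (p.1, p.2 ++ [pvToInt x])) ([], [])
  let q := p.1.foldl (fun (q : List Char × List Char) w =>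
      if PySem.Chars.isupper w then (q.1 ++ [w], q.2) else (q.1, q.2 ++ [w])) ([], [])
  let r := p.2.foldl (fun (r : List Int × List Int) z =>
      if PySem.Int.mod z 2 == 0 then (r.1 ++ [z], r.2) else (r.1, r.2 ++ [z])) ([], [])
  let upper := PySem.List.sorted q.1 (fun w => w) false
  let lower := PySem.List.sorted q.2 (fun w => w) false
  let even := PySem.List.sorted r.1 (fun z => z) false
  let odd := PySem.List.sorted r.2 (fun z => z) false
  String.mk ((lower ++ upper) ++ ((odd ++ even).map PySem.Int.toChars).flatten)

-- ===== PORT B =====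
-- the key: class (lower 0 / upper 1 / odd 2 / even 3) scaled past any code point, then the char itself
def pvRank (c : Char) : Int :=
  (if PySem.Chars.isalpha c then (if PySem.Chars.islower c then (0 : Int) else 1)
   else (if PySem.Int.mod (pvToInt c) 2 ≠ 0 then 2 else 3)) * 1114112 + c.toNat

def sor_alt (k : String) : String :=
  String.mk (PySem.List.sorted k.toList pvRank false)

-- ===== PRECONDITION & SPEC =====
-- Pre_ excludes exactly the strings containing a char that is neither a letter nor a digit:
-- there Python's int(x) raises ValueError in A (and in B's sort key).
def Pre_sor (k : String) : Prop :=
  (k.toList.all fun c => PySem.Chars.isalpha c || PySem.Chars.isdigit c) = true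
instance (k : String) : Decidable (Pre_sor k) := by unfold Pre_sor; infer_instance
def pvWitness_sor : String := "Sorting1234"

def Spec_sor (k : String) (out : String) : Prop := out = sor_alt k
instance (k : String) (out : String) : Decidable (Spec_sor k out) := by unfold Spec_sor; infer_instance

-- ===== CLAIM (what is proved, stated in full; the proofs are below) =====
def Claim_equal_sor : Prop := ∀ (k : String), Dom_sor k → Pre_sor k → Spec_sor k (sor k)

-- ===== LEMMAS AND PROOFS =====

-- basic Char facts
lemma charToNat_lt (c : Char) : c.toNat < 1114112 := by
  have := c.valid
  rcases this with h | ⟨h1, h2⟩ <;> (unfold Char.toNat; omega)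

lemma charToNat_inj {a b : Char} (h : a.toNat = b.toNat) : a = b := by
  apply Char.ext; unfold Char.toNat at h; exact UInt32.toNat_inj.mp h

lemma charLe_iff {a b : Char} : a ≤ b ↔ a.toNat ≤ b.toNat := by
  rw [Char.le_def]; unfold Char.toNat; exact UInt32.le_iff_toNat_le

lemma isdigit_iff (c : Char) : PySem.Chars.isdigit c = true ↔ (48 ≤ c.toNat ∧ c.toNat ≤ 57) := by
  simp [PySem.Chars.isdigit, Char.le_def, UInt32.le_iff_toNat_le]

lemma islower_of_alpha_not_upper {c : Char} (h1 : PySem.Chars.isalpha c = true)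
    (h2 : PySem.Chars.isupper c = false) : PySem.Chars.islower c = true := by
  simp [PySem.Chars.isalpha, h2] at h1; exact h1

lemma isupper_iff (c : Char) : PySem.Chars.isupper c = true ↔ (65 ≤ c.toNat ∧ c.toNat ≤ 90) := by
  simp [PySem.Chars.isupper, Char.le_def, UInt32.le_iff_toNat_le]

lemma islower_iff (c : Char) : PySem.Chars.islower c = true ↔ (97 ≤ c.toNat ∧ c.toNat ≤ 122) := by
  simp [PySem.Chars.islower, Char.le_def, UInt32.le_iff_toNat_le]

lemma digit_cases {c : Char} (h : PySem.Chars.isdigit c = true) :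
    c = '0' ∨ c = '1' ∨ c = '2' ∨ c = '3' ∨ c = '4' ∨ c = '5' ∨ c = '6' ∨ c = '7' ∨ c = '8' ∨ c = '9' := by
  have hb := (isdigit_iff c).mp h
  have ht : c.toNat = 48 ∨ c.toNat = 49 ∨ c.toNat = 50 ∨ c.toNat = 51 ∨ c.toNat = 52 ∨
      c.toNat = 53 ∨ c.toNat = 54 ∨ c.toNat = 55 ∨ c.toNat = 56 ∨ c.toNat = 57 := by omega
  rcases ht with h|h|h|h|h|h|h|h|h|h
  · have : c = '0' := charToNat_inj (h.trans rfl); tauto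
  · have : c = '1' := charToNat_inj (h.trans rfl); tauto
  · have : c = '2' := charToNat_inj (h.trans rfl); tauto
  · have : c = '3' := charToNat_inj (h.trans rfl); tauto
  · have : c = '4' := charToNat_inj (h.trans rfl); tauto
  · have : c = '5' := charToNat_inj (h.trans rfl); tauto
  · have : c = '6' := charToNat_inj (h.trans rfl); tauto
  · have : c = '7' := charToNat_inj (h.trans rfl); tauto
  · have : c = '8' := charToNat_inj (h.trans rfl); tauto
  · have : c = '9' := charToNat_inj (h.trans rfl); tauto

lemma pvToInt_digit {c : Char} (h : PySem.Chars.isdigit c = true) :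
    pvToInt c = (c.toNat : Int) - 48 := by
  rcases digit_cases h with h|h|h|h|h|h|h|h|h|h <;> subst h <;> decide

lemma toChars_pvToInt {c : Char} (h : PySem.Chars.isdigit c = true) :
    PySem.Int.toChars (pvToInt c) = [c] := by
  rcases digit_cases h with h|h|h|h|h|h|h|h|h|h <;> subst h <;> decide

-- the key is globally injective: the class stays below 4, the code point below 1114112
lemma pvRank_inj : Function.Injective pvRank := by
  intro a b h
  have ha := charToNat_lt a; have hb := charToNat_lt b
  apply charToNat_inj
  unfold pvRank at h
  split_ifs at h <;> omega

-- rank of each class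
lemma rank_lower {c : Char} (h1 : PySem.Chars.isalpha c = true) (h2 : PySem.Chars.isupper c = false) :
    pvRank c = (c.toNat : Int) := by
  unfold pvRank; rw [if_pos h1, if_pos (islower_of_alpha_not_upper h1 h2)]; ring

lemma rank_upper {c : Char} (h1 : PySem.Chars.isalpha c = true) (h2 : PySem.Chars.isupper c = true) :
    pvRank c = 1114112 + (c.toNat : Int) := by
  have hl : PySem.Chars.islower c = false := by
    rw [Bool.eq_false_iff]; intro hlow
    have := (islower_iff c).mp hlow; have := (isupper_iff c).mp h2; omega
  unfold pvRank; rw [if_pos h1, if_neg (by simp [hl]), one_mul]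

lemma rank_odd {c : Char} (h1 : PySem.Chars.isalpha c = false)
    (h2 : (PySem.Int.mod (pvToInt c) 2 == 0) = false) :
    pvRank c = 2 * 1114112 + (c.toNat : Int) := by
  unfold pvRank
  rw [if_neg (by simp [h1]), if_pos (by simpa using h2)]

lemma rank_even {c : Char} (h1 : PySem.Chars.isalpha c = false)
    (h2 : (PySem.Int.mod (pvToInt c) 2 == 0) = true) :
    pvRank c = 3 * 1114112 + (c.toNat : Int) := by
  unfold pvRank
  rw [if_neg (by simp [h1]), if_neg (by simpa using h2)]

-- the three accumulator loops of A are filters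
lemma part1 (xs : List Char) (a : List Char) (b : List Int) :
    xs.foldl (fun (p : List Char × List Int) x =>
        if PySem.Chars.isalpha x then (p.1 ++ [x], p.2) else (p.1, p.2 ++ [pvToInt x])) (a, b)
    = (a ++ xs.filter PySem.Chars.isalpha,
       b ++ (xs.filter (fun x => !PySem.Chars.isalpha x)).map pvToInt) := by
  induction xs generalizing a b with
  | nil => simp
  | cons x xs ih => cases h : PySem.Chars.isalpha x <;> simp [h, ih]

lemma part2 (xs : List Char) (a b : List Char) :
    xs.foldl (fun (q : List Char × List Char) w =>
        if PySem.Chars.isupper w then (q.1 ++ [w], q.2) else (q.1, q.2 ++ [w])) (a, b)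
    = (a ++ xs.filter PySem.Chars.isupper,
       b ++ xs.filter (fun w => !PySem.Chars.isupper w)) := by
  induction xs generalizing a b with
  | nil => simp
  | cons x xs ih => cases h : PySem.Chars.isupper x <;> simp [h, ih]

lemma part3 (xs : List Int) (a b : List Int) :
    xs.foldl (fun (r : List Int × List Int) z =>
        if PySem.Int.mod z 2 == 0 then (r.1 ++ [z], r.2) else (r.1, r.2 ++ [z])) (a, b)
    = (a ++ xs.filter (fun z => PySem.Int.mod z 2 == 0),
       b ++ xs.filter (fun z => !(PySem.Int.mod z 2 == 0))) := by
  induction xs generalizing a b with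
  | nil => simp
  | cons x xs ih =>
    cases h : PySem.Int.mod x 2 == 0
    · have h' : ¬ (2:Int) ∣ x := by simpa [PySem.Int.mod_eq_zero_iff_dvd] using h
      rw [List.foldl_cons, if_neg (by simp [h']), ih]
      simp [h']
    · have h' : (2:Int) ∣ x := by simpa [PySem.Int.mod_eq_zero_iff_dvd] using h
      rw [List.foldl_cons, if_pos (by simp [h']), ih]
      simp [h']

-- sorting the images equals mapping the sorted sources
lemma sorted_map_pvToInt (ds : List Char) :
    PySem.List.sorted (ds.map pvToInt) (fun z => z) false
      = (PySem.List.sorted ds pvToInt false).map pvToInt := by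
  apply PySem.List.eq_of_perm_of_pairwise_le_of_injective (fun z : Int => z) (fun a b h => h)
  · exact (PySem.List.sorted_perm _ _ _).trans
      (((PySem.List.sorted_perm ds pvToInt false).map pvToInt).symm)
  · exact PySem.List.sorted_pairwise _ _
  · rw [List.pairwise_map]; exact PySem.List.sorted_pairwise ds pvToInt

lemma flatten_singletons (l : List Char) : (l.map (fun c => [c])).flatten = l := by
  induction l with
  | nil => rfl
  | cons x xs ih => simp [ih]

-- the heart: A's four sorted buckets concatenated are exactly B's single keyed sort
lemma list_eq (cs : List Char)
    (hmem : ∀ c ∈ cs, PySem.Chars.isalpha c = true ∨ PySem.Chars.isdigit c = true) :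
    (PySem.List.sorted ((cs.filter PySem.Chars.isalpha).filter (fun w => !PySem.Chars.isupper w)) (fun w => w) false ++
     PySem.List.sorted ((cs.filter PySem.Chars.isalpha).filter PySem.Chars.isupper) (fun w => w) false) ++
    ((PySem.List.sorted (((cs.filter (fun x => !PySem.Chars.isalpha x)).map pvToInt).filter (fun z => !(PySem.Int.mod z 2 == 0))) (fun z => z) false ++
      PySem.List.sorted (((cs.filter (fun x => !PySem.Chars.isalpha x)).map pvToInt).filter (fun z => PySem.Int.mod z 2 == 0)) (fun z => z) false).map PySem.Int.toChars).flatten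
    = PySem.List.sorted cs pvRank false := by
  have hdsd : ∀ c ∈ cs.filter (fun x => !PySem.Chars.isalpha x), PySem.Chars.isdigit c = true := by
    intro c hc
    have hm := List.mem_filter.mp hc
    rcases hmem c hm.1 with h | h
    · exact absurd h (by simpa using hm.2)
    · exact h
  have hcollapse : ∀ (l : List Char), (∀ c ∈ l, PySem.Chars.isdigit c = true) →
      (l.map (PySem.Int.toChars ∘ pvToInt)).flatten = l := by
    intro l hl
    have h1 : l.map (PySem.Int.toChars ∘ pvToInt) = l.map (fun c => [c]) :=
      List.map_congr_left (fun c hc => toChars_pvToInt (hl c hc))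
    rw [h1, flatten_singletons]
  rw [List.filter_map, List.filter_map, sorted_map_pvToInt, sorted_map_pvToInt,
      List.map_append, List.map_map, List.map_map, List.flatten_append]
  rw [hcollapse _ (fun c hc => hdsd c (List.mem_filter.mp ((PySem.List.mem_sorted _ _ _ _).mp hc)).1),
      hcollapse _ (fun c hc => hdsd c (List.mem_filter.mp ((PySem.List.mem_sorted _ _ _ _).mp hc)).1)]
  -- name the four blocks
  set letters := List.filter PySem.Chars.isalpha cs with hlet
  set ds := List.filter (fun x => !PySem.Chars.isalpha x) cs with hds
  set B1 := PySem.List.sorted (List.filter (fun w => !PySem.Chars.isupper w) letters) (fun w => w) false with hB1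
  set B2 := PySem.List.sorted (List.filter PySem.Chars.isupper letters) (fun w => w) false with hB2
  set B3 := PySem.List.sorted (List.filter ((fun z => !PySem.Int.mod z 2 == 0) ∘ pvToInt) ds) pvToInt false with hB3
  set B4 := PySem.List.sorted (List.filter ((fun z => PySem.Int.mod z 2 == 0) ∘ pvToInt) ds) pvToInt false with hB4
  -- rank value on each block
  have r1 : ∀ c ∈ B1, pvRank c = (c.toNat : Int) := by
    intro c hc
    have hm := List.mem_filter.mp ((PySem.List.mem_sorted _ _ _ _).mp hc)
    exact rank_lower (List.mem_filter.mp hm.1).2 (by simpa using hm.2)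
  have r2 : ∀ c ∈ B2, pvRank c = 1114112 + (c.toNat : Int) := by
    intro c hc
    have hm := List.mem_filter.mp ((PySem.List.mem_sorted _ _ _ _).mp hc)
    exact rank_upper (List.mem_filter.mp hm.1).2 hm.2
  have m3 : ∀ c ∈ B3, c ∈ ds := fun c hc =>
    (List.mem_filter.mp ((PySem.List.mem_sorted _ _ _ _).mp hc)).1
  have m4 : ∀ c ∈ B4, c ∈ ds := fun c hc =>
    (List.mem_filter.mp ((PySem.List.mem_sorted _ _ _ _).mp hc)).1
  have r3 : ∀ c ∈ B3, pvRank c = 2 * 1114112 + (c.toNat : Int) := by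
    intro c hc
    have hm := List.mem_filter.mp ((PySem.List.mem_sorted _ _ _ _).mp hc)
    refine rank_odd (by simpa using (List.mem_filter.mp hm.1).2) ?_
    simpa [Function.comp] using hm.2
  have r4 : ∀ c ∈ B4, pvRank c = 3 * 1114112 + (c.toNat : Int) := by
    intro c hc
    have hm := List.mem_filter.mp ((PySem.List.mem_sorted _ _ _ _).mp hc)
    refine rank_even (by simpa using (List.mem_filter.mp hm.1).2) ?_
    simpa [Function.comp] using hm.2
  refine PySem.List.eq_of_perm_of_pairwise_le_of_injective pvRank pvRank_inj ?_ ?_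
      (PySem.List.sorted_pairwise cs pvRank)
  · -- permutation
    refine List.Perm.trans ?_ (PySem.List.sorted_perm cs pvRank false).symm
    have pl : (B1 ++ B2).Perm letters := by
      refine ((PySem.List.sorted_perm _ _ _).append (PySem.List.sorted_perm _ _ _)).trans ?_
      have base := List.filter_append_perm (fun w => !PySem.Chars.isupper w) letters
      have hcong : List.filter (fun x => !(!PySem.Chars.isupper x)) letters
          = List.filter PySem.Chars.isupper letters :=
        List.filter_congr (fun x _ => by simp)
      rwa [hcong] at base
    have pr : (B3 ++ B4).Perm ds := by
      refine ((PySem.List.sorted_perm _ _ _).append (PySem.List.sorted_perm _ _ _)).trans ?_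
      have base := List.filter_append_perm ((fun z => !PySem.Int.mod z 2 == 0) ∘ pvToInt) ds
      have hcong : List.filter (fun x => !((fun z => !PySem.Int.mod z 2 == 0) ∘ pvToInt) x) ds
          = List.filter ((fun z => PySem.Int.mod z 2 == 0) ∘ pvToInt) ds :=
        List.filter_congr (fun x _ => by simp [Function.comp])
      rwa [hcong] at base
    exact (pl.append pr).trans (List.filter_append_perm _ cs)
  · -- pairwise on the concatenation
    have w1 : List.Pairwise (fun a b => pvRank a ≤ pvRank b) B1 :=
      (PySem.List.sorted_pairwise _ _).imp_of_mem (fun {a b} ha hb hle => by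
        rw [r1 _ ha, r1 _ hb]; exact_mod_cast charLe_iff.mp hle)
    have w2 : List.Pairwise (fun a b => pvRank a ≤ pvRank b) B2 :=
      (PySem.List.sorted_pairwise _ _).imp_of_mem (fun {a b} ha hb hle => by
        rw [r2 _ ha, r2 _ hb]
        have := charLe_iff.mp hle; omega)
    have w3 : List.Pairwise (fun a b => pvRank a ≤ pvRank b) B3 :=
      (PySem.List.sorted_pairwise _ _).imp_of_mem (fun {a b} ha hb hle => by
        rw [r3 _ ha, r3 _ hb]
        rw [pvToInt_digit (hdsd _ (m3 _ ha)), pvToInt_digit (hdsd _ (m3 _ hb))] at hle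
        omega)
    have w4 : List.Pairwise (fun a b => pvRank a ≤ pvRank b) B4 :=
      (PySem.List.sorted_pairwise _ _).imp_of_mem (fun {a b} ha hb hle => by
        rw [r4 _ ha, r4 _ hb]
        rw [pvToInt_digit (hdsd _ (m4 _ ha)), pvToInt_digit (hdsd _ (m4 _ hb))] at hle
        omega)
    rw [List.pairwise_append]
    refine ⟨List.pairwise_append.mpr ⟨w1, w2, ?_⟩, List.pairwise_append.mpr ⟨w3, w4, ?_⟩, ?_⟩
    · intro a ha b hb
      rw [r1 _ ha, r2 _ hb]
      have := charToNat_lt a; omega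
    · intro a ha b hb
      rw [r3 _ ha, r4 _ hb]
      have := charToNat_lt a; omega
    · intro a ha b hb
      have hbv : pvRank b = 2 * 1114112 + (b.toNat : Int) ∨ pvRank b = 3 * 1114112 + (b.toNat : Int) := by
        rcases List.mem_append.mp hb with h | h
        · exact Or.inl (r3 _ h)
        · exact Or.inr (r4 _ h)
      have hav : pvRank a = (a.toNat : Int) ∨ pvRank a = 1114112 + (a.toNat : Int) := by
        rcases List.mem_append.mp ha with h | h
        · exact Or.inl (r1 _ h)
        · exact Or.inr (r2 _ h)
      have := charToNat_lt a
      rcases hav with h1 | h1 <;> rcases hbv with h2 | h2 <;> rw [h1, h2] <;> omega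


-- ===== VERDICT (by name: the statement is the Claim_ definition above) =====
theorem sor_spec : Claim_equal_sor := by
  intro k _hd hpre
  unfold Spec_sor sor sor_alt
  simp only [part1, part2, part3, List.nil_append]
  exact congrArg String.mk (list_eq k.toList (by simpa [Pre_sor, List.all_eq_true] using hpre))
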